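-- pv_equiv track=rewrite | github.com/socathie/CodeFights | LoopTunnel/IncreaseNumberRoundness.py | increaseNumberRoundness
-- ===== SOURCE A (Python) =====
-- def increaseNumberRoundness(n):
--     while n%10==0:
--         n //= 10
--
--     temp = 1
--     while n:
--         temp *= n%10
--         n//=10
--
--     if temp ==0:
--         return True
--     else:
--         return False
-- ===== SOURCE B (Python) =====
-- def increaseNumberRoundness(n):
--     return '0' in str(n).rstrip('0')
-- ===== Notes on version B (the rewrite author's own statement) =====
-- stated objective: idiomatic
-- what changed: Replaces the two arithmetic while-loops (trailing-zero stripping by repeated floor division, then a digit-product accumulator tested against 0) with a one-line string scan: strip trailing zeros of str(n) and check whether '0' occurs.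
import Mathlib
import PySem

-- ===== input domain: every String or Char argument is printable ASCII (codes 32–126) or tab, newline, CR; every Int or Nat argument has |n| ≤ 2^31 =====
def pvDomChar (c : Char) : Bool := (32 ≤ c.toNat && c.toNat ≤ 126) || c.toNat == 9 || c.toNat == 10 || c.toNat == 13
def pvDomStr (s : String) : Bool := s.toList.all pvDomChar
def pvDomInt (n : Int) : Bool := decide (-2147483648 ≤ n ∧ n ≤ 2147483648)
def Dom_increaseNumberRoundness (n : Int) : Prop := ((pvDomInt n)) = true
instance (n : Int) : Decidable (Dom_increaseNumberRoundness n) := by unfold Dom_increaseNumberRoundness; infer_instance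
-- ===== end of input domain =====

-- B replaces A's two arithmetic while-loops (strip trailing zeros by division, digit-product test)
-- with the idiomatic one-liner `'0' in str(n).rstrip('0')`; return values agree for every n ≥ 1
-- (A loops forever on n ≤ 0, which Pre_ excludes).

-- ===== PORT A =====
-- `while n % 10 == 0: n //= 10`; the `0 < n` conjunct only makes the recursion total
-- (on every input admitted by Pre_ the loop state stays positive, so behaviour is identical).
def pvStripA (n : Int) : Int :=
  if PySem.Int.mod n 10 = 0 ∧ 0 < n then pvStripA (PySem.Int.floordiv n 10) else n
termination_by n.toNat
decreasing_by
  simp only [PySem.Int.floordiv]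
  rename_i h
  have h1 : Int.fdiv n 10 = n / 10 := Int.fdiv_eq_ediv_of_nonneg _ (by omega)
  omega

-- `temp = 1; while n: temp *= n % 10; n //= 10`; again `0 < n` (rather than `n ≠ 0`) only
-- makes the recursion total — on the positive values reached under Pre_ it is the same test.
def pvProdA (n temp : Int) : Int :=
  if 0 < n then pvProdA (PySem.Int.floordiv n 10) (temp * PySem.Int.mod n 10) else temp
termination_by n.toNat
decreasing_by
  simp only [PySem.Int.floordiv]
  rename_i h
  have h1 : Int.fdiv n 10 = n / 10 := Int.fdiv_eq_ediv_of_nonneg _ (by omega)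
  omega

def increaseNumberRoundness (n : Int) : Bool :=
  let n1 := pvStripA n
  let temp := pvProdA n1 1
  if temp = 0 then true else false

-- ===== PORT B =====
-- Source B: return '0' in str(n).rstrip('0')
-- PySem has no right-only rstrip-with-chars, so str.rstrip('0') is ported exactly by hand:
-- drop '0's from the reversed character list and reverse back.
def increaseNumberRoundness_alt (n : Int) : Bool :=
  let s := PySem.Int.toChars n
  let stripped := (s.reverse.dropWhile (· == '0')).reverse
  PySem.Chars.isIn ['0'] stripped

-- ===== PRECONDITION & SPEC =====
-- Pre_ excludes exactly n ≤ 0: there A never returns (the first while-loop runs forever,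
-- on n = 0 immediately and on n < 0 once n reaches -1, since (-1) % 10 == 9 = 0 is false
-- but -1 // 10 == -1 keeps the second loop spinning).
def Pre_increaseNumberRoundness (n : Int) : Prop := 1 ≤ n
instance (n : Int) : Decidable (Pre_increaseNumberRoundness n) := by
  unfold Pre_increaseNumberRoundness; infer_instance

def pvWitness_increaseNumberRoundness : Int := (105)

def Spec_increaseNumberRoundness (n : Int) (out : Bool) : Prop := out = increaseNumberRoundness_alt n
instance (n : Int) (out : Bool) : Decidable (Spec_increaseNumberRoundness n out) := by
  unfold Spec_increaseNumberRoundness; infer_instance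

-- ===== CLAIM (what is proved, stated in full; the proofs are below) =====
def Claim_equal_increaseNumberRoundness : Prop := ∀ (n : Int), Dom_increaseNumberRoundness n → Pre_increaseNumberRoundness n → Spec_increaseNumberRoundness n (increaseNumberRoundness n)

-- ===== LEMMAS AND PROOFS =====

-- Nat-level mirrors of the quantities both ports compute.
def pvNatChars (m : Nat) : List Char :=
  if m < 10 then [Nat.digitChar m] else pvNatChars (m / 10) ++ [Nat.digitChar (m % 10)]
termination_by m
decreasing_by omega

def pvStripNat (m : Nat) : Nat :=
  if m % 10 = 0 ∧ 0 < m then pvStripNat (m / 10) else m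
termination_by m
decreasing_by omega

def pvProdNat (m : Nat) : Nat :=
  if 0 < m then (m % 10) * pvProdNat (m / 10) else 1
termination_by m
decreasing_by omega

theorem pv_fdiv_cast (m : Nat) : Int.fdiv (m : Int) 10 = ((m / 10 : Nat) : Int) := by
  rw [Int.fdiv_eq_ediv_of_nonneg _ (by omega)]
  omega

theorem pv_fmod_cast (m : Nat) : Int.fmod (m : Int) 10 = ((m % 10 : Nat) : Int) := by
  rw [Int.fmod_eq_emod]
  simp only [if_pos (Or.inl (by omega : (0:Int) ≤ 10))]
  omega

theorem pvStripA_cast (m : Nat) : pvStripA (m : Int) = ((pvStripNat m : Nat) : Int) := by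
  induction m using Nat.strong_induction_on with
  | _ m ih =>
    rw [pvStripA, pvStripNat]
    simp only [PySem.Int.mod, PySem.Int.floordiv, pv_fmod_cast, pv_fdiv_cast]
    by_cases h : m % 10 = 0 ∧ 0 < m
    · rw [if_pos (by omega), if_pos h, ih (m / 10) (by omega)]
    · rw [if_neg (by omega), if_neg h]

theorem pvProdA_cast (m : Nat) : ∀ t : Int, pvProdA (m : Int) t = t * ((pvProdNat m : Nat) : Int) := by
  induction m using Nat.strong_induction_on with
  | _ m ih =>
    intro t
    rw [pvProdA, pvProdNat]
    by_cases h : 0 < m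
    · rw [if_pos (by omega), if_pos h]
      simp only [PySem.Int.mod, PySem.Int.floordiv, pv_fmod_cast, pv_fdiv_cast]
      rw [ih (m / 10) (by omega)]
      push_cast
      ring
    · rw [if_neg (by omega), if_neg h]
      simp

theorem pv_toDigitsCore_eq : ∀ f m acc, m < f →
    Nat.toDigitsCore 10 f m acc = pvNatChars m ++ acc := by
  intro f
  induction f with
  | zero => omega
  | succ f ih =>
    intro m acc hm
    rw [Nat.toDigitsCore, pvNatChars]
    by_cases h : m < 10
    · have : m / 10 = 0 := by omega
      rw [if_pos this, if_pos h]
      have : m % 10 = m := by omega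
      rw [this]
      rfl
    · have hne : ¬ m / 10 = 0 := by omega
      rw [if_neg hne, if_neg h, ih (m / 10) _ (by omega), List.append_assoc]
      rfl

theorem pv_toChars_cast (m : Nat) : PySem.Int.toChars (m : Int) = pvNatChars m := by
  simp only [PySem.Int.toChars]
  rw [if_neg (by omega)]
  have : ((m : Int)).toNat = m := by omega
  rw [this, Nat.toDigits, pv_toDigitsCore_eq (m + 1) m [] (by omega), List.append_nil]

theorem pv_digitChar_eq_zero (d : Nat) (hd : d < 10) : Nat.digitChar d = '0' ↔ d = 0 := by
  interval_cases d <;> simp [Nat.digitChar]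

theorem pvStripNat_pos (m : Nat) (hm : 0 < m) : 0 < pvStripNat m := by
  induction m using Nat.strong_induction_on with
  | _ m ih =>
    rw [pvStripNat]
    by_cases h : m % 10 = 0 ∧ 0 < m
    · rw [if_pos h]
      exact ih (m / 10) (by omega) (by omega)
    · rw [if_neg h]; exact hm

theorem pvProdNat_zero_iff (m : Nat) (hm : 0 < m) :
    pvProdNat m = 0 ↔ '0' ∈ pvNatChars m := by
  induction m using Nat.strong_induction_on with
  | _ m ih =>
    rw [pvProdNat, pvNatChars, if_pos hm]
    by_cases h : m < 10
    · rw [if_pos h]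
      have h0 : pvProdNat (m / 10) = 1 := by rw [pvProdNat]; simp [Nat.div_eq_of_lt h]
      have hmm : m % 10 = m := by omega
      have hd : ('0' = Nat.digitChar m) ↔ m = 0 := by
        rw [eq_comm]; exact pv_digitChar_eq_zero m h
      rw [hmm, h0, mul_one, List.mem_singleton, hd]
    · rw [if_neg h]
      have hrec := ih (m / 10) (by omega) (by omega)
      have hd : ('0' = Nat.digitChar (m % 10)) ↔ m % 10 = 0 := by
        rw [eq_comm]; exact pv_digitChar_eq_zero _ (by omega)
      rw [List.mem_append, List.mem_singleton, Nat.mul_eq_zero, hrec, hd]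
      tauto

theorem pv_strip_chars (m : Nat) (hm : 0 < m) :
    (pvNatChars m).reverse.dropWhile (· == '0') = (pvNatChars (pvStripNat m)).reverse := by
  induction m using Nat.strong_induction_on with
  | _ m ih =>
    by_cases h : m % 10 = 0
    · have h10 : 10 ≤ m := by omega
      rw [pvStripNat, if_pos ⟨h, hm⟩]
      conv_lhs => rw [pvNatChars, if_neg (by omega)]
      rw [List.reverse_append]
      simp only [List.reverse_singleton, List.singleton_append, List.dropWhile_cons]
      rw [h]
      rw [if_pos (by decide)]
      exact ih (m / 10) (by omega) (by omega)
    · have hstrip : pvStripNat m = m := by rw [pvStripNat, if_neg (by omega)]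
      rw [hstrip]
      by_cases hlt : m < 10
      · conv_lhs => rw [pvNatChars, if_pos hlt]
        simp only [List.reverse_singleton, List.dropWhile_cons]
        rw [if_neg (by
          simp only [beq_iff_eq]
          rw [pv_digitChar_eq_zero m hlt]
          omega)]
        rw [pvNatChars, if_pos hlt]
        rfl
      · conv_lhs => rw [pvNatChars, if_neg hlt]
        rw [List.reverse_append]
        simp only [List.reverse_singleton, List.singleton_append, List.dropWhile_cons]
        rw [if_neg (by
          simp only [beq_iff_eq]
          rw [pv_digitChar_eq_zero (m % 10) (by omega)]
          omega)]
        conv_rhs => rw [pvNatChars, if_neg hlt]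
        rw [List.reverse_append]
        rfl

theorem pv_isIn_singleton (c : Char) (l : List Char) :
    PySem.Chars.isIn [c] l = decide (c ∈ l) := by
  by_cases h : c ∈ l
  · have : PySem.Chars.isIn [c] l = true := by
      rw [PySem.Chars.isIn_iff_infix, List.singleton_infix_iff]; exact h
    simp [this, h]
  · have : PySem.Chars.isIn [c] l = false := by
      rw [PySem.Chars.isIn_eq_false_iff, List.singleton_infix_iff]; exact h
    simp [this, h]

-- ===== VERDICT (by name: the statement is the Claim_ definition above) =====
theorem increaseNumberRoundness_spec : Claim_equal_increaseNumberRoundness := by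
  intro n _ hpre
  have hpre' : (1 : Int) ≤ n := hpre
  obtain ⟨m, rfl⟩ : ∃ m : Nat, n = (m : Int) := ⟨n.toNat, by omega⟩
  have hm : 0 < m := by omega
  have hms : 0 < pvStripNat m := pvStripNat_pos m hm
  show (if pvProdA (pvStripA (m : Int)) 1 = 0 then true else false)
      = PySem.Chars.isIn ['0']
          ((List.dropWhile (fun x => x == '0') (PySem.Int.toChars (m : Int)).reverse).reverse)
  rw [pvStripA_cast, pvProdA_cast, pv_toChars_cast, pv_strip_chars m hm,
    List.reverse_reverse, pv_isIn_singleton]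
  rw [one_mul]
  have hiff := pvProdNat_zero_iff (pvStripNat m) hms
  by_cases hz : pvProdNat (pvStripNat m) = 0
  · rw [if_pos (by exact_mod_cast hz)]
    simp [hiff.mp hz]
  · rw [if_neg (by exact_mod_cast hz)]
    simp [hiff.not.mp hz]
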